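-- pv_equiv track=rewrite | github.com/nikitamessi69/Python_Dive | Task_7.py | fill_backpack
-- ===== SOURCE A (Python) =====
-- def fill_backpack(items, max_weight):
--     sorted_items = sorted(items.items(), key=lambda x: x[1])
--     backpack = {}
--     total_weight = 0
--
--     for item, weight in sorted_items:
--         if total_weight + weight <= max_weight:
--             backpack[item] = weight
--             total_weight += weight
--
--     return backpack
-- ===== SOURCE B (Python) =====
-- def fill_backpack(items, max_weight):
--     # Sort by weight ascending (stable), build the table of cumulative
--     # weights, cut it at the threshold, and turn that prefix into a dict.
--     # Since weights are ascending, once a cumulative sum exceeds max_weight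
--     # every later item would also fail A's test, so the kept items are
--     # exactly the leading run whose cumulative weight stays <= max_weight.
--     pairs = sorted(items.items(), key=lambda p: p[1])
--     totals = []
--     s = 0
--     for _, w in pairs:
--         s += w
--         totals.append(s)
--     cut = 0
--     for t in totals:
--         if t > max_weight:
--             break
--         cut += 1
--     return dict(pairs[:cut])
-- ===== Notes on version B (the rewrite author's own statement) =====
-- stated objective: alternative
-- what changed: Replaces the incremental accumulate-and-branch loop with a build-then-cut shape: sort, materialise the prefix-sum table of weights, find the cut point where the cumulative weight first exceeds max_weight, and build the result dict from that sorted prefix in one go (valid because ascending weights make the kept set a prefix).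
import Mathlib
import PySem

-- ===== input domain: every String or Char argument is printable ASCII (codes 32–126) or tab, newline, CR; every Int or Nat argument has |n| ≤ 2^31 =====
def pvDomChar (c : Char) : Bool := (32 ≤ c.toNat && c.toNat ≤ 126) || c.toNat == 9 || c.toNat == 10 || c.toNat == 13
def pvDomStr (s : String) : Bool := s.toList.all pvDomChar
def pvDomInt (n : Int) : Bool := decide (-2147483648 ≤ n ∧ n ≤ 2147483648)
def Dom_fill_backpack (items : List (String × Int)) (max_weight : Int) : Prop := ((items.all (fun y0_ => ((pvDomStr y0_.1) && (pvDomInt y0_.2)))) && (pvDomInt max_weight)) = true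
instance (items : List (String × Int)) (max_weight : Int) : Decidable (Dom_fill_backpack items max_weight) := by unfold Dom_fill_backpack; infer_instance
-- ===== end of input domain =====

-- B replaces A's incremental accumulate-and-branch loop by a build-then-cut shape
-- (sort, prefix-sum table, cut at the threshold, dict of the prefix); same cost, alternative decomposition.

-- ===== PORT A =====
def fill_backpack (items : List (String × Int)) (max_weight : Int) : List (String × Int) :=
  (((PySem.List.sorted items (fun x => x.2)).foldl
    (fun (st : PySem.Dict String Int × Int) iw =>
      if st.2 + iw.2 ≤ max_weight then (st.1.insert iw.1 iw.2, st.2 + iw.2) else st)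
    (PySem.Dict.empty, 0)).1).items

-- ===== PORT B =====
-- the 'for t in totals: if t > max_weight: break; cut += 1' loop of Source B
def pvCut (totals : List Int) (max_weight : Int) : Nat :=
  match totals with
  | [] => 0
  | t :: rest => if max_weight < t then 0 else pvCut rest max_weight + 1

def fill_backpack_alt (items : List (String × Int)) (max_weight : Int) : List (String × Int) :=
  (PySem.Dict.ofList (PySem.List.slice (PySem.List.sorted items (fun p => p.2)) none
    (some ((pvCut ((PySem.List.sorted items (fun p => p.2)).foldl
      (fun (st : List Int × Int) p => (st.1 ++ [st.2 + p.2], st.2 + p.2)) ([], 0)).1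
      max_weight : Int))))).items

-- ===== PRECONDITION & SPEC =====
def Spec_fill_backpack (items : List (String × Int)) (max_weight : Int) (out : List (String × Int)) : Prop := out = fill_backpack_alt items max_weight
instance (items : List (String × Int)) (max_weight : Int) (out : List (String × Int)) : Decidable (Spec_fill_backpack items max_weight out) := by unfold Spec_fill_backpack; infer_instance

-- ===== CLAIM (what is proved, stated in full; the proofs are below) =====
def Claim_equal_fill_backpack : Prop := ∀ (items : List (String × Int)) (max_weight : Int), Dom_fill_backpack items max_weight → Spec_fill_backpack items max_weight (fill_backpack items max_weight)

-- ===== LEMMAS AND PROOFS =====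

-- the items A's loop keeps, as a take-while over the running total
def pvTW (mw : Int) : Int → List (String × Int) → List (String × Int)
  | _, [] => []
  | t, p :: r => if t + p.2 ≤ mw then p :: pvTW mw (t + p.2) r else []

-- the prefix sums of the weights
def pvPS : Int → List (String × Int) → List Int
  | _, [] => []
  | t, p :: r => (t + p.2) :: pvPS (t + p.2) r

theorem pvPS_fold (l : List (String × Int)) (acc : List Int) (t : Int) :
    (l.foldl (fun (st : List Int × Int) p => (st.1 ++ [st.2 + p.2], st.2 + p.2)) (acc, t)).1
      = acc ++ pvPS t l := by
  induction l generalizing acc t with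
  | nil => simp [pvPS]
  | cons p r ih => simp [List.foldl, pvPS, ih]

theorem pvCut_take (mw : Int) (l : List (String × Int)) (t : Int) :
    l.take (pvCut (pvPS t l) mw) = pvTW mw t l := by
  induction l generalizing t with
  | nil => simp [pvPS, pvCut, pvTW]
  | cons p r ih =>
    by_cases h : t + p.2 ≤ mw
    · simp [pvPS, pvCut, pvTW, not_lt.mpr h, h, ih]
    · simp [pvPS, pvCut, pvTW, not_le.mp h, h]

theorem loopA_skip (mw : Int) (l : List (String × Int)) (d : PySem.Dict String Int) (t : Int)
    (h : ∀ q ∈ l, mw < t + q.2) :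
    l.foldl (fun (st : PySem.Dict String Int × Int) iw =>
        if st.2 + iw.2 ≤ mw then (st.1.insert iw.1 iw.2, st.2 + iw.2) else st) (d, t) = (d, t) := by
  induction l with
  | nil => rfl
  | cons p r ih =>
    have hp : mw < t + p.2 := h p (by simp)
    simp only [List.foldl, not_le.mpr hp, if_false]
    exact ih (fun q hq => h q (by simp [hq]))

theorem loopA_eq (mw : Int) (l : List (String × Int)) (d : PySem.Dict String Int) (t : Int)
    (hs : l.Pairwise (fun a b => a.2 ≤ b.2)) :
    (l.foldl (fun (st : PySem.Dict String Int × Int) iw =>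
        if st.2 + iw.2 ≤ mw then (st.1.insert iw.1 iw.2, st.2 + iw.2) else st) (d, t)).1
      = (pvTW mw t l).foldl (fun d p => d.insert p.1 p.2) d := by
  induction l generalizing d t with
  | nil => rfl
  | cons p r ih =>
    rcases List.pairwise_cons.mp hs with ⟨hle, hr⟩
    by_cases h : t + p.2 ≤ mw
    · simp only [List.foldl, h, if_true, pvTW]
      exact ih (d.insert p.1 p.2) (t + p.2) hr
    · have hskip : ∀ q ∈ r, mw < t + q.2 := fun q hq =>
        by have h1 := not_le.mp h; have h2 := hle q hq; omega
      simp only [List.foldl, h, if_false, pvTW]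
      rw [loopA_skip mw r d t hskip]

-- ===== VERDICT (by name: the statement is the Claim_ definition above) =====
theorem fill_backpack_spec : Claim_equal_fill_backpack := by
  intro items mw _
  unfold Spec_fill_backpack fill_backpack fill_backpack_alt
  have hs := PySem.List.sorted_pairwise items (fun x : String × Int => x.2)
  set l := PySem.List.sorted items (fun x : String × Int => x.2) with hl
  rw [loopA_eq mw l PySem.Dict.empty 0 hs]
  rw [pvPS_fold l [] 0, List.nil_append, PySem.List.slice_to_natCast, pvCut_take]
  rfl
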